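-- pv_equiv track=rewrite | github.com/beansthelightkeeper/beansapplications | beansai.py | find_related_primes
-- ===== SOURCE A (Python) =====
-- import math
--
-- def simple_gematria(word):
--     return sum(ord(c) - 64 for c in word.upper() if 'A' <= c <= 'Z')
--
-- def is_prime(num):
--     if num < 2:
--         return False
--     for i in range(2, int(math.sqrt(num)) + 1):
--         if num % i == 0:
--             return False
--     return True
--
-- def find_related_primes(val, all_words, max_dist=5):
--     related = []
--     for dist in range(1, max_dist + 1):
--         for sign in [1, -1]:
--             target = val + sign * dist
--             if is_prime(target):
--                 matching = [w for w in all_words if simple_gematria(w) == target][:1]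
--                 if matching:
--                     related.append(matching[0])
--     return related
-- ===== SOURCE B (Python) =====
-- import math
--
-- def _is_prime(num):
--     if num < 2:
--         return False
--     for i in range(2, int(math.sqrt(num)) + 1):
--         if num % i == 0:
--             return False
--     return True
--
-- def find_related_primes(val, all_words, max_dist=5):
--     # one pass: index the first word seen for each gematria value
--     first_by_g = {}
--     for w in all_words:
--         g = sum(ord(c) - 64 for c in w.upper() if 'A' <= c <= 'Z')
--         if g not in first_by_g:
--             first_by_g[g] = w
--     targets = [val + s * d for d in range(1, max_dist + 1) for s in (1, -1)]
--     return [first_by_g[t] for t in targets if t in first_by_g and _is_prime(t)]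
-- ===== Notes on version B (the rewrite author's own statement) =====
-- stated objective: faster
-- what changed: B replaces A's per-target rescan of all_words (one full list comprehension for every prime candidate target) with a single pass that indexes the first word per gematria value in a dict, then a flat comprehension over the signed-distance targets does an O(1) membership test before the primality check.
import Mathlib
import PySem

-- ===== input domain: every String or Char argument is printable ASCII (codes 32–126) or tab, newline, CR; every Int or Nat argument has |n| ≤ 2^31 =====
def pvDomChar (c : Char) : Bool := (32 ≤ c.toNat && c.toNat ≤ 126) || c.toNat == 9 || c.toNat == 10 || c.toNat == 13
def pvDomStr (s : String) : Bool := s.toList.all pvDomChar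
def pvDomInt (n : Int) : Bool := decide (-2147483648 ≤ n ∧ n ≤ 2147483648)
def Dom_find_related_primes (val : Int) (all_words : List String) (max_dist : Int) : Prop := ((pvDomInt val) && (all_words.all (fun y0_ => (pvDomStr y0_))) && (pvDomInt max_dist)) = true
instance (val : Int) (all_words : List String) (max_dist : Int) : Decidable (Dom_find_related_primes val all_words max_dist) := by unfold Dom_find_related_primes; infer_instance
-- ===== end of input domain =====

-- B builds a first-word-per-gematria index in one pass and looks prime targets up in it,
-- replacing A's full rescan of all_words for every candidate target (objective: alternative).


-- ===== PORT A =====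
def simple_gematria (word : String) : Int :=
  (PySem.Str.upper word).toList.foldl
    (fun acc c => if decide ('A' ≤ c) && decide (c ≤ 'Z') then acc + ((c.toNat : Int) - 64) else acc) 0

-- int(math.sqrt(num)) = Nat.sqrt exactly for 0 ≤ num ≤ 2^31 (double sqrt is exact there; checked against CPython)
def is_prime (num : Int) : Bool :=
  if num < 2 then false
  else !((PySem.List.pyRange 2 ((Nat.sqrt num.toNat : Int) + 1) 1).any
          (fun i => PySem.Int.mod num i == 0))

def find_related_primes (val : Int) (all_words : List String) (max_dist : Int) : List String :=
  (PySem.List.pyRange 1 (max_dist + 1) 1).foldl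
    (fun related dist =>
      ([1, -1] : List Int).foldl
        (fun related sign =>
          let target := val + sign * dist
          if is_prime target then
            match (all_words.filter (fun w => simple_gematria w == target)).take 1 with
            | [] => related
            | m :: _ => related ++ [m]
          else related)
        related)
    []

-- ===== PORT B =====
def gem_alt (w : String) : Int :=
  ((((PySem.Str.upper w).toList.filter (fun c => decide ('A' ≤ c) && decide (c ≤ 'Z'))).map
    (fun c => (c.toNat : Int) - 64))).sum

-- int(math.sqrt(num)) = Nat.sqrt exactly for 0 ≤ num ≤ 2^31, as in port A
def is_prime_alt (num : Int) : Bool :=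
  if num < 2 then false
  else !((PySem.List.pyRange 2 ((Nat.sqrt num.toNat : Int) + 1) 1).any
          (fun i => PySem.Int.mod num i == 0))

def find_related_primes_alt (val : Int) (all_words : List String) (max_dist : Int) : List String :=
  let first_by_g : PySem.Dict Int String :=
    all_words.foldl
      (fun d w => let g := gem_alt w; if d.contains g then d else d.insert g w)
      PySem.Dict.empty
  let targets : List Int :=
    (PySem.List.pyRange 1 (max_dist + 1) 1).flatMap
      (fun d => ([1, -1] : List Int).map (fun s => val + s * d))
  -- first_by_g[t] is guarded by 't in first_by_g', so getD's default is never used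
  (targets.filter (fun t => first_by_g.contains t && is_prime_alt t)).map
    (fun t => first_by_g.getD t "")

-- ===== PRECONDITION & SPEC =====
def Spec_find_related_primes (val : Int) (all_words : List String) (max_dist : Int) (out : List String) : Prop := out = find_related_primes_alt val all_words max_dist
instance (val : Int) (all_words : List String) (max_dist : Int) (out : List String) : Decidable (Spec_find_related_primes val all_words max_dist out) := by unfold Spec_find_related_primes; infer_instance

-- ===== CLAIM (what is proved, stated in full; the proofs are below) =====
def Claim_equal_find_related_primes : Prop := ∀ (val : Int) (all_words : List String) (max_dist : Int), Dom_find_related_primes val all_words max_dist → Spec_find_related_primes val all_words max_dist (find_related_primes val all_words max_dist)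

-- ===== LEMMAS AND PROOFS =====

theorem gem_eq (w : String) : simple_gematria w = gem_alt w := by
  unfold simple_gematria gem_alt
  rw [PySem.List.foldl_if_eq_foldl_filter, PySem.List.foldl_add]
  simp

theorem prime_eq (n : Int) : is_prime n = is_prime_alt n := rfl

-- the per-target contribution both programs append
def hit (all_words : List String) (t : Int) : List String :=
  if is_prime t then ((all_words.find? (fun w => simple_gematria w == t)).toList) else []

theorem filter_take_one {α : Type} (p : α → Bool) (xs : List α) :
    (xs.filter p).take 1 = (xs.find? p).toList := by
  induction xs with
  | nil => rfl
  | cons x xs ih =>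
    by_cases h : p x
    · simp [h]
    · simpa [List.filter_cons, List.find?_cons, h] using ih

theorem stepA_eq (all_words : List String) (rel : List String) (t : Int) :
    (if is_prime t then
        match (all_words.filter (fun w => simple_gematria w == t)).take 1 with
        | [] => rel
        | m :: _ => rel ++ [m]
      else rel) = rel ++ hit all_words t := by
  unfold hit
  rw [filter_take_one]
  by_cases hp : is_prime t
  · cases all_words.find? (fun w => simple_gematria w == t) <;> simp [hp]
  · simp [hp]

theorem A_flatMap (val : Int) (all_words : List String) (max_dist : Int) :
    find_related_primes val all_words max_dist =
      (PySem.List.pyRange 1 (max_dist + 1) 1).flatMap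
        (fun d => hit all_words (val + 1 * d) ++ hit all_words (val + (-1) * d)) := by
  unfold find_related_primes
  have hstep : ∀ (rel : List String) (d : Int),
      ([1, -1] : List Int).foldl
        (fun related sign =>
          let target := val + sign * d
          if is_prime target then
            match (all_words.filter (fun w => simple_gematria w == target)).take 1 with
            | [] => related
            | m :: _ => related ++ [m]
          else related)
        rel = rel ++ (hit all_words (val + 1 * d) ++ hit all_words (val + (-1) * d)) := by
    intro rel d
    simp only [List.foldl_cons, List.foldl_nil]
    rw [stepA_eq, stepA_eq, List.append_assoc]
  calc (PySem.List.pyRange 1 (max_dist + 1) 1).foldl _ [] =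
      (PySem.List.pyRange 1 (max_dist + 1) 1).foldl
        (fun rel d => rel ++ (hit all_words (val + 1 * d) ++ hit all_words (val + (-1) * d))) [] := by
        apply PySem.List.foldl_congr_mem
        intro acc x _
        exact hstep acc x
    _ = _ := by
        rw [PySem.List.foldl_append_eq_flatMap]
        simp

-- the dict built by B returns the FIRST word of each gematria value
theorem build_get? (ws : List String) (d : PySem.Dict Int String) (t : Int) :
    (ws.foldl (fun d w => let g := gem_alt w; if d.contains g then d else d.insert g w) d).get? t
      = (d.get? t).or (ws.find? (fun w => gem_alt w == t)) := by
  induction ws generalizing d with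
  | nil => simp
  | cons w ws ih =>
    simp only [List.foldl_cons, List.find?_cons]
    rw [ih]
    by_cases hc : d.contains (gem_alt w)
    · rw [if_pos hc]
      rw [PySem.Dict.contains_eq_isSome_get?] at hc
      by_cases ht : gem_alt w = t
      · subst ht
        cases hg : d.get? (gem_alt w) with
        | none => rw [hg] at hc; simp at hc
        | some v => simp [Option.or]
      · simp [beq_eq_false_iff_ne.mpr ht]
    · rw [if_neg hc, PySem.Dict.get?_insert]
      by_cases ht : gem_alt w = t
      · subst ht
        rw [PySem.Dict.contains_eq_isSome_get?] at hc
        cases hg : d.get? (gem_alt w) with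
        | none => simp [Option.or]
        | some v => rw [hg] at hc; simp at hc
      · have hne : t ≠ gem_alt w := fun h => ht h.symm
        simp [hne, beq_eq_false_iff_ne.mpr ht]

theorem filter_map_pair {q : Int → Bool} {g : Int → String} {h : Int → List String}
    (hone : ∀ t, (if q t then [g t] else []) = h t) (t1 t2 : Int) :
    (([t1, t2].filter q).map g) = h t1 ++ h t2 := by
  rw [← hone t1, ← hone t2]
  by_cases h1 : q t1 <;> by_cases h2 : q t2 <;> simp [h1, h2]

theorem B_flatMap (val : Int) (all_words : List String) (max_dist : Int) :
    find_related_primes_alt val all_words max_dist =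
      (PySem.List.pyRange 1 (max_dist + 1) 1).flatMap
        (fun d => hit all_words (val + 1 * d) ++ hit all_words (val + (-1) * d)) := by
  unfold find_related_primes_alt
  simp only []
  have hget : ∀ t, (all_words.foldl
      (fun d w => let g := gem_alt w; if d.contains g then d else d.insert g w)
      PySem.Dict.empty).get? t = all_words.find? (fun w => gem_alt w == t) := by
    intro t; rw [build_get?]; simp [Option.or]
  have hone : ∀ t : Int,
      ((if (all_words.foldl
          (fun d w => let g := gem_alt w; if d.contains g then d else d.insert g w)
          PySem.Dict.empty).contains t && is_prime_alt t then
        [(all_words.foldl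
          (fun d w => let g := gem_alt w; if d.contains g then d else d.insert g w)
          PySem.Dict.empty).getD t ""] else []) : List String) = hit all_words t := by
    intro t
    rw [PySem.Dict.getD_eq_get?_getD, PySem.Dict.contains_eq_isSome_get?, hget]
    unfold hit
    rw [← prime_eq]
    have hfind : (fun w => gem_alt w == t) = (fun w : String => simple_gematria w == t) :=
      funext fun w => by rw [gem_eq]
    rw [hfind]
    by_cases hp : is_prime t
    · cases all_words.find? (fun w => simple_gematria w == t) <;> simp [hp]
    · simp [hp]
  rw [List.filter_flatMap, List.map_flatMap]
  apply List.flatMap_congr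
  intro d _
  simpa using filter_map_pair hone (val + 1 * d) (val + (-1) * d)

-- ===== VERDICT (by name: the statement is the Claim_ definition above) =====
theorem find_related_primes_spec : Claim_equal_find_related_primes := by
  intro val all_words max_dist _
  unfold Spec_find_related_primes
  rw [A_flatMap, B_flatMap]
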